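-- pv_equiv track=rewrite | github.com/palaniwd/APA-Game | backend/game/board.py | get_valid_jumps
-- ===== SOURCE A (Python) =====
-- from typing import List, Dict, Optional, Tuple
--
-- def get_valid_jumps(node: int) -> List[Tuple[int, int]]:
--     """
--     Returns list of (jump_over, land_on) tuples for a Tiger at 'node'.
--     A jump is valid if node -> jump_over -> land_on form a straight line.
--     """
--     jumps = []
--
--     # === Horizontal Jumps (within rows) ===
--
--     # Row 1 (nodes 1-6)
--     for start in range(1, 5):
--         if node == start:
--             jumps.append((start + 1, start + 2))
--         if node == start + 2:
--             jumps.append((start + 1, start))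
--
--     # Row 2 (nodes 7-12)
--     for start in range(7, 11):
--         if node == start:
--             jumps.append((start + 1, start + 2))
--         if node == start + 2:
--             jumps.append((start + 1, start))
--
--     # Row 3 (nodes 13-18)
--     for start in range(13, 17):
--         if node == start:
--             jumps.append((start + 1, start + 2))
--         if node == start + 2:
--             jumps.append((start + 1, start))
--
--     # Row 4 (nodes 19-22)
--     for start in range(19, 21):
--         if node == start:
--             jumps.append((start + 1, start + 2))
--         if node == start + 2:
--             jumps.append((start + 1, start))
--
--     # === Vertical Jumps from Apex ===
--     # Apex (0) can jump over Row 1 to Row 2 (via nodes 2, 3, 4, 5)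
--     apex_jumps = [
--         (0, 2, 8),   # 0 -> 2 -> 8
--         (0, 3, 9),   # 0 -> 3 -> 9
--         (0, 4, 10),  # 0 -> 4 -> 10
--         (0, 5, 11),  # 0 -> 5 -> 11
--     ]
--     for (start, mid, end) in apex_jumps:
--         if node == start:
--             jumps.append((mid, end))
--         if node == end:
--             jumps.append((mid, start))
--
--     # === Vertical Jumps: Row 1 -> Row 2 -> Row 3 ===
--     for col in range(1, 7):
--         r1 = col
--         r2 = col + 6
--         r3 = col + 12
--         if node == r1:
--             jumps.append((r2, r3))
--         if node == r3:
--             jumps.append((r2, r1))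
--
--     # === Vertical Jumps: Row 2 -> Row 3 -> Row 4 (center columns) ===
--     vertical_r234 = [
--         (8, 14, 19),
--         (9, 15, 20),
--         (10, 16, 21),
--         (11, 17, 22)
--     ]
--     for (r2, r3, r4) in vertical_r234:
--         if node == r2:
--             jumps.append((r3, r4))
--         if node == r4:
--             jumps.append((r3, r2))
--
--     # === Diagonal Jumps in bottom triangle ===
--     # These follow the diagonal connection lines
--     # 14-20-? and 15-19-? and similar patterns
--     # For the inner triangle, diagonal jumps are possible if 3 nodes are in line
--
--     # Left diagonal: 14 -> 20 -> ? (no third node in line)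
--     # Cross diagonal patterns:
--     # 14 -> 15 -> 20 (not a straight line diagonal)
--     # The inner diagonals are short connections without jump-through capability
--     # in the standard rules, so we leave diagonal captures within row 3-4 area
--
--     return jumps
-- ===== SOURCE B (Python) =====
-- from typing import List, Tuple
--
-- # All collinear triples (a, b, c) of the board, in A's processing order.
-- _LINES = (
--     [(s, s + 1, s + 2) for s in range(1, 5)]
--     + [(s, s + 1, s + 2) for s in range(7, 11)]
--     + [(s, s + 1, s + 2) for s in range(13, 17)]
--     + [(s, s + 1, s + 2) for s in range(19, 21)]
--     + [(0, 2, 8), (0, 3, 9), (0, 4, 10), (0, 5, 11)]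
--     + [(c, c + 6, c + 12) for c in range(1, 7)]
--     + [(8, 14, 19), (9, 15, 20), (10, 16, 21), (11, 17, 22)]
-- )
--
-- # Precomputed lookup table: node -> list of (jump_over, land_on).
-- _JUMPS = {}
-- for _a, _b, _c in _LINES:
--     _JUMPS.setdefault(_a, []).append((_b, _c))
--     _JUMPS.setdefault(_c, []).append((_b, _a))
--
-- def get_valid_jumps(node: int) -> List[Tuple[int, int]]:
--     return list(_JUMPS.get(node, []))
-- ===== Notes on version B (the rewrite author's own statement) =====
-- stated objective: simpler
-- what changed: Replaced A's seven per-line scanning loops executed on every call with a single module-level table of collinear triples compiled once into a dict node->jumps, so the function body is one dict lookup.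
import Mathlib
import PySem

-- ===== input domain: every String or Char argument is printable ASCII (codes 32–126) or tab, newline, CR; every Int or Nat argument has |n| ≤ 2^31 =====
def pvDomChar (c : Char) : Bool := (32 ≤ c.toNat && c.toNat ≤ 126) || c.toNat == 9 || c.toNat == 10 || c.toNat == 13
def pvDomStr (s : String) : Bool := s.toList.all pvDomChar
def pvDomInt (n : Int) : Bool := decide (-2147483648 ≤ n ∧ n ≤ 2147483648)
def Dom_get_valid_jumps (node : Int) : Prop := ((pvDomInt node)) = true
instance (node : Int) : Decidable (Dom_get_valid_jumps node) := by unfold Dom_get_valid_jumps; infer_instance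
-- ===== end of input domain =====

-- B replaces A's seven ad-hoc loops by one precomputed table node → jumps, queried by a single dict lookup (objective: simpler).

-- ===== PORT A =====
def get_valid_jumps (node : Int) : List (Int × Int) :=
  let jumps : List (Int × Int) := []
  -- Row 1
  let jumps := (PySem.List.pyRange 1 5 1).foldl (fun jumps start =>
    let jumps := if node == start then jumps ++ [(start + 1, start + 2)] else jumps
    if node == start + 2 then jumps ++ [(start + 1, start)] else jumps) jumps
  -- Row 2
  let jumps := (PySem.List.pyRange 7 11 1).foldl (fun jumps start =>
    let jumps := if node == start then jumps ++ [(start + 1, start + 2)] else jumps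
    if node == start + 2 then jumps ++ [(start + 1, start)] else jumps) jumps
  -- Row 3
  let jumps := (PySem.List.pyRange 13 17 1).foldl (fun jumps start =>
    let jumps := if node == start then jumps ++ [(start + 1, start + 2)] else jumps
    if node == start + 2 then jumps ++ [(start + 1, start)] else jumps) jumps
  -- Row 4
  let jumps := (PySem.List.pyRange 19 21 1).foldl (fun jumps start =>
    let jumps := if node == start then jumps ++ [(start + 1, start + 2)] else jumps
    if node == start + 2 then jumps ++ [(start + 1, start)] else jumps) jumps
  -- Apex jumps
  let apex_jumps : List (Int × Int × Int) := [(0, 2, 8), (0, 3, 9), (0, 4, 10), (0, 5, 11)]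
  let jumps := apex_jumps.foldl (fun jumps t =>
    let (start, mid, «end») := t
    let jumps := if node == start then jumps ++ [(mid, «end»)] else jumps
    if node == «end» then jumps ++ [(mid, start)] else jumps) jumps
  -- Vertical Row1 -> Row2 -> Row3
  let jumps := (PySem.List.pyRange 1 7 1).foldl (fun jumps col =>
    let r1 := col
    let r2 := col + 6
    let r3 := col + 12
    let jumps := if node == r1 then jumps ++ [(r2, r3)] else jumps
    if node == r3 then jumps ++ [(r2, r1)] else jumps) jumps
  -- Vertical Row2 -> Row3 -> Row4
  let vertical_r234 : List (Int × Int × Int) := [(8, 14, 19), (9, 15, 20), (10, 16, 21), (11, 17, 22)]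
  let jumps := vertical_r234.foldl (fun jumps t =>
    let (r2, r3, r4) := t
    let jumps := if node == r2 then jumps ++ [(r3, r4)] else jumps
    if node == r4 then jumps ++ [(r3, r2)] else jumps) jumps
  jumps

-- ===== PORT B =====
-- all collinear triples of the board, in A's processing order
def pvLinesB : List (Int × Int × Int) :=
  ((PySem.List.pyRange 1 5 1).map (fun s => (s, s + 1, s + 2)))
    ++ ((PySem.List.pyRange 7 11 1).map (fun s => (s, s + 1, s + 2)))
    ++ ((PySem.List.pyRange 13 17 1).map (fun s => (s, s + 1, s + 2)))
    ++ ((PySem.List.pyRange 19 21 1).map (fun s => (s, s + 1, s + 2)))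
    ++ [(0, 2, 8), (0, 3, 9), (0, 4, 10), (0, 5, 11)]
    ++ ((PySem.List.pyRange 1 7 1).map (fun c => (c, c + 6, c + 12)))
    ++ [(8, 14, 19), (9, 15, 20), (10, 16, 21), (11, 17, 22)]

-- precomputed lookup table node -> list of (jump_over, land_on)
def pvJumpsTable : PySem.Dict Int (List (Int × Int)) :=
  pvLinesB.foldl (fun d t =>
    let (a, b, c) := t
    let d := d.modify a [] (· ++ [(b, c)])
    d.modify c [] (· ++ [(b, a)])) PySem.Dict.empty

def get_valid_jumps_alt (node : Int) : List (Int × Int) :=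
  pvJumpsTable.getD node []

-- ===== PRECONDITION & SPEC =====
def Spec_get_valid_jumps (node : Int) (out : List (Int × Int)) : Prop := out = get_valid_jumps_alt node
instance (node : Int) (out : List (Int × Int)) : Decidable (Spec_get_valid_jumps node out) := by unfold Spec_get_valid_jumps; infer_instance

-- ===== CLAIM (what is proved, stated in full; the proofs are below) =====
def Claim_equal_get_valid_jumps : Prop := ∀ (node : Int), Dom_get_valid_jumps node → Spec_get_valid_jumps node (get_valid_jumps node)

-- ===== LEMMAS AND PROOFS =====

-- both programs return [] for any node off the board (outside 0..22)
set_option maxRecDepth 8000 in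
theorem pv_out_of_range (node : Int) (h : node < 0 ∨ 22 < node) :
    get_valid_jumps node = [] ∧ get_valid_jumps_alt node = [] := by
  have h0 : node ≠ 0 := by omega
  have h1 : node ≠ 1 := by omega
  have h2 : node ≠ 2 := by omega
  have h3 : node ≠ 3 := by omega
  have h4 : node ≠ 4 := by omega
  have h5 : node ≠ 5 := by omega
  have h6 : node ≠ 6 := by omega
  have h7 : node ≠ 7 := by omega
  have h8 : node ≠ 8 := by omega
  have h9 : node ≠ 9 := by omega
  have h10 : node ≠ 10 := by omega
  have h11 : node ≠ 11 := by omega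
  have h12 : node ≠ 12 := by omega
  have h13 : node ≠ 13 := by omega
  have h14 : node ≠ 14 := by omega
  have h15 : node ≠ 15 := by omega
  have h16 : node ≠ 16 := by omega
  have h17 : node ≠ 17 := by omega
  have h18 : node ≠ 18 := by omega
  have h19 : node ≠ 19 := by omega
  have h20 : node ≠ 20 := by omega
  have h21 : node ≠ 21 := by omega
  have h22 : node ≠ 22 := by omega
  have e1 : PySem.List.pyRange 1 5 1 = [1, 2, 3, 4] := by decide
  have e2 : PySem.List.pyRange 7 11 1 = [7, 8, 9, 10] := by decide
  have e3 : PySem.List.pyRange 13 17 1 = [13, 14, 15, 16] := by decide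
  have e4 : PySem.List.pyRange 19 21 1 = [19, 20] := by decide
  have e5 : PySem.List.pyRange 1 7 1 = [1, 2, 3, 4, 5, 6] := by decide
  constructor
  · simp [get_valid_jumps, e1, e2, e3, e4, e5,
      h0, h1, h2, h3, h4, h5, h6, h7, h8, h9, h10, h11, h12, h13, h14, h15,
      h16, h17, h18, h19, h20, h21, h22]
  · have eT : pvJumpsTable = PySem.Dict.mk [((1 : Int), [((2 : Int), (3 : Int)), ((7 : Int), (13 : Int))]), ((3 : Int), [((2 : Int), (1 : Int)), ((4 : Int), (5 : Int)), ((9 : Int), (15 : Int))]), ((2 : Int), [((3 : Int), (4 : Int)), ((8 : Int), (14 : Int))]), ((4 : Int), [((3 : Int), (2 : Int)), ((5 : Int), (6 : Int)), ((10 : Int), (16 : Int))]), ((5 : Int), [((4 : Int), (3 : Int)), ((11 : Int), (17 : Int))]), ((6 : Int), [((5 : Int), (4 : Int)), ((12 : Int), (18 : Int))]), ((7 : Int), [((8 : Int), (9 : Int))]), ((9 : Int), [((8 : Int), (7 : Int)), ((10 : Int), (11 : Int)), ((3 : Int), (0 : Int)), ((15 : Int), (20 : Int))]), ((8 : Int),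 [((9 : Int), (10 : Int)), ((2 : Int), (0 : Int)), ((14 : Int), (19 : Int))]), ((10 : Int), [((9 : Int), (8 : Int)), ((11 : Int), (12 : Int)), ((4 : Int), (0 : Int)), ((16 : Int), (21 : Int))]), ((11 : Int), [((10 : Int), (9 : Int)), ((5 : Int), (0 : Int)), ((17 : Int), (22 : Int))]), ((12 : Int), [((11 : Int), (10 : Int))]), ((13 : Int), [((14 : Int), (15 : Int)), ((7 : Int), (1 : Int))]), ((15 : Int), [((14 : Int), (13 : Int)), ((16 : Int), (17 : Int)), ((9 : Int), (3 : Int))]), ((14 : Int), [((15 : Int), (16 : Int)), ((8 : Int), (2 : Int))]), ((16 : Int), [((15 : Int), (14 : Int)), ((17 : Int), (18 : Int)), ((10 : Int), (4 : Int))]), ((17 : Int), [((16 : Int), (15 : Int)), ((11 : Int), (5 : Int))]), ((18 : Int), [((17 : Int), (16 : Int)), ((12 : Int), (6 : Int))]), ((19 : Int), [((20 : Int), (21 : Int)), ((14 : Int), (8 : Int))]), ((21 : Int), [((20 : Int), (19 : Int)), ((16 : Int), (10 : Int))]), ((20 : Int), [((21 : Int), (22 : Int)), ((15 : Int), (9 :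 Int))]), ((22 : Int), [((21 : Int), (20 : Int)), ((17 : Int), (11 : Int))]), ((0 : Int), [((2 : Int), (8 : Int)), ((3 : Int), (9 : Int)), ((4 : Int), (10 : Int)), ((5 : Int), (11 : Int))])] := by decide
    simp [get_valid_jumps_alt, eT, PySem.Dict.getD, PySem.Dict.get?,
      Ne.symm h0, Ne.symm h1, Ne.symm h2, Ne.symm h3, Ne.symm h4, Ne.symm h5, Ne.symm h6,
      Ne.symm h7, Ne.symm h8, Ne.symm h9, Ne.symm h10, Ne.symm h11, Ne.symm h12, Ne.symm h13,
      Ne.symm h14, Ne.symm h15, Ne.symm h16, Ne.symm h17, Ne.symm h18, Ne.symm h19,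
      Ne.symm h20, Ne.symm h21, Ne.symm h22]

-- ===== VERDICT (by name: the statement is the Claim_ definition above) =====
set_option maxRecDepth 8000 in
theorem get_valid_jumps_spec : Claim_equal_get_valid_jumps := by
  intro node _
  unfold Spec_get_valid_jumps
  by_cases h : 0 ≤ node ∧ node ≤ 22
  · obtain ⟨h1, h2⟩ := h
    interval_cases node <;> decide
  · obtain ⟨hA, hB⟩ := pv_out_of_range node (by omega)
    rw [hA, hB]
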